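-- pv_equiv track=rewrite | github.com/INTERA-Inc/tobit-trend | src/preprocessing/water_level_trends_03.py | all_vars
-- ===== SOURCE A (Python) =====
-- from typing import Any, Dict, List, Optional, Union
--
-- def all_vars(formula_text: str) -> List[str]:
--     s = formula_text.replace(" ", "")
--     out: List[str] = []
--     token = ""
--     for ch in s:
--         if ch.isalnum() or ch == "_":
--             token += ch
--         else:
--             if token:
--                 out.append(token)
--                 token = ""
--     if token:
--         out.append(token)
--     return [x for x in out if x not in {"log", "log10"}]
-- ===== SOURCE B (Python) =====
-- def all_vars(formula_text):
--     s = formula_text.replace(" ", "")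
--
--     def word(ch):
--         return ch.isalnum() or ch == "_"
--
--     toks = []
--     i, n = 0, len(s)
--     while i < n:
--         if word(s[i]):
--             j = i
--             while j < n and word(s[j]):
--                 j += 1
--             toks.append(s[i:j])
--             i = j
--         else:
--             i += 1
--     return [t for t in toks if t not in ("log", "log10")]
-- ===== Notes on version B (the rewrite author's own statement) =====
-- stated objective: alternative
-- what changed: B scans maximal word-character runs with a two-pointer (slice out each run at once) instead of A's per-character accumulator that grows a token string and flushes it on separators.
import Mathlib
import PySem

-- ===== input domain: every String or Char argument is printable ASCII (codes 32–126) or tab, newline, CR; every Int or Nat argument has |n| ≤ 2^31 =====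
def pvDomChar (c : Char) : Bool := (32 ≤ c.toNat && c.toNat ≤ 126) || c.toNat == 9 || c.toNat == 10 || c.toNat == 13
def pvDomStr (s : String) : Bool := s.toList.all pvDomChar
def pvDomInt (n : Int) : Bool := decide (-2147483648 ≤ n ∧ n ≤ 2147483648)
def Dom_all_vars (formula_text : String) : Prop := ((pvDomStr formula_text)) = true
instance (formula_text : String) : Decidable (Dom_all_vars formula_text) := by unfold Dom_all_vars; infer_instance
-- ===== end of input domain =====

-- B replaces A's per-character token accumulator with a run-scanner that slices out
-- each maximal word-character run at once (alternative decomposition, same cost).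


-- ===== PORT A =====
-- one step of A's for-loop over the characters; state = (out, token)
def aStep (p : List String × List Char) (ch : Char) : List String × List Char :=
  if PySem.Chars.isalnum ch || ch == '_' then (p.1, p.2 ++ [ch])
  else if p.2 ≠ [] then (p.1 ++ [String.ofList p.2], []) else p

-- the trailing 'if token: out.append(token)'
def aFinish (p : List String × List Char) : List String :=
  if p.2 ≠ [] then p.1 ++ [String.ofList p.2] else p.1

def all_vars (formula_text : String) : List String :=
  let s := PySem.Str.replace formula_text " " ""
  let out := aFinish (s.toList.foldl aStep ([], []))
  out.filter (fun x => !(x == "log" || x == "log10"))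

-- ===== PORT B =====
def altWord (ch : Char) : Bool := PySem.Chars.isalnum ch || ch == '_'

-- two-pointer run scanner: at a word char, slice out the maximal run and jump past it
def altTokens : List Char → List String
  | [] => []
  | c :: cs =>
    if altWord c then
      String.ofList ((c :: cs).takeWhile altWord) :: altTokens (cs.dropWhile altWord)
    else altTokens cs
termination_by l => l.length
decreasing_by
  · have := cs.length_dropWhile_le altWord
    simp; omega
  · simp

def all_vars_alt (formula_text : String) : List String :=
  let s := PySem.Str.replace formula_text " " ""
  (altTokens s.toList).filter (fun t => !(t == "log" || t == "log10"))

-- ===== PRECONDITION & SPEC =====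
def Spec_all_vars (formula_text : String) (out : List String) : Prop := out = all_vars_alt formula_text
instance (formula_text : String) (out : List String) : Decidable (Spec_all_vars formula_text out) := by unfold Spec_all_vars; infer_instance

-- ===== CLAIM (what is proved, stated in full; the proofs are below) =====
def Claim_equal_all_vars : Prop := ∀ (formula_text : String), Dom_all_vars formula_text → Spec_all_vars formula_text (all_vars formula_text)

-- ===== LEMMAS AND PROOFS =====

-- B's tokens when a partial token 'tok' is already in flight (proof-side generalisation)
def altTokensFrom (tok : List Char) (l : List Char) : List String :=
  (if tok ++ l.takeWhile altWord = [] then [] else [String.ofList (tok ++ l.takeWhile altWord)])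
    ++ altTokens (l.dropWhile altWord)

lemma altTokensFrom_nil_eq (l : List Char) : altTokensFrom [] l = altTokens l := by
  induction l with
  | nil => simp [altTokensFrom, altTokens]
  | cons c cs ih =>
    by_cases h : altWord c = true
    · simp [altTokensFrom, altTokens, h]
    · simp only [Bool.not_eq_true] at h
      simp [altTokensFrom, altTokens, h] at ih ⊢

lemma foldl_aStep_eq (l : List Char) : ∀ (out : List String) (tok : List Char),
    aFinish (l.foldl aStep (out, tok)) = out ++ altTokensFrom tok l := by
  induction l with
  | nil =>
    intro out tok
    by_cases h : tok = [] <;> simp [aFinish, altTokensFrom, altTokens, h]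

  | cons c cs ih =>
    intro out tok
    by_cases h : altWord c = true
    · have h' : (PySem.Chars.isalnum c || c == '_') = true := h
      have hstep : aStep (out, tok) c = (out, tok ++ [c]) := by
        simp [aStep, h']
      rw [List.foldl_cons, hstep, ih]
      simp [altTokensFrom, h]
    · have h' : (PySem.Chars.isalnum c || c == '_') = false := by
        simpa [altWord] using h
      simp only [Bool.not_eq_true] at h
      by_cases ht : tok = []
      · subst ht
        have hstep : aStep (out, ([] : List Char)) c = (out, []) := by
          simp [aStep, h']
        rw [List.foldl_cons, hstep, ih]
        rw [altTokensFrom_nil_eq, altTokensFrom_nil_eq]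
        simp [altTokens, h]
      · have hstep : aStep (out, tok) c = (out ++ [String.ofList tok], []) := by
          simp [aStep, h', ht]
        rw [List.foldl_cons, hstep, ih]
        rw [altTokensFrom_nil_eq]
        simp [altTokensFrom, altTokens, h, ht]

-- ===== VERDICT (by name: the statement is the Claim_ definition above) =====
theorem all_vars_spec : Claim_equal_all_vars := by
  intro formula_text _
  unfold Spec_all_vars all_vars all_vars_alt
  simp only [foldl_aStep_eq, altTokensFrom_nil_eq, List.nil_append]
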